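-- pv_equiv track=rewrite | github.com/equilicore/see-and-tell | src/captions/captions_improved.py | build_captions_class_matrix
-- ===== SOURCE A (Python) =====
-- from collections import Counter
--
-- def build_captions_class_matrix(filtered_nps: list[list[list[str]]], predictions: list[list[str]]) \
--         -> tuple[dict[str, Counter], dict[str, set]]:
--     """This function computes the needed statistics to associate a score with
--      each pair of noun phrase and predicted label
--
--     Args:
--         filtered_nps (list[list[str]]): the i-th element represents a list of noun phrases extracted from the i-th text
--         predictions (list[list[str]]): the i-th elements represents a list of face labels
--         predicted on the i-th image (associated with the i-th text)
--
--     Returns: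
--         tuple[Counter, Counter]: class_np_counter: the class frequency of each word in the given noun phrases,
--         np_class_counter: the set of classes seen with each word in the given noun phrases
--     """
--
--     # to save the frequency of each NP with each class
--     prediction_np_counter = {}
--
--     # to save which classes each NP was seen with: used mainly for the inverse document frequency component
--     np_prediction_counter = {}
--
--     for np_list, pred_list in zip(filtered_nps, predictions):
--         # the first step is to find the terms / tokens associated with every label
--         for p in pred_list:
--             if p not in prediction_np_counter:
--                 prediction_np_counter[p] = Counter()  # a dictionary for each of the classes
--
--             # iterate through the noun phrases:
--             for np_tokens in np_list:
--                 # increase the frequency of each term in the caption, in the dictionary associated with the class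
--                 prediction_np_counter[p].update(dict([(token, 1) for token in np_tokens]))
--
--                 for token in np_tokens:
--                     if token not in np_prediction_counter:
--                         np_prediction_counter[token] = set()
--                         # add the pred to the list of classes 'word' is associated with
--                     np_prediction_counter[token].add(p)
--
--     return prediction_np_counter, np_prediction_counter
-- ===== SOURCE B (Python) =====
-- from collections import Counter
--
--
-- def build_captions_class_matrix(filtered_nps: list[list[list[str]]], predictions: list[list[str]]) \
--         -> tuple[dict[str, Counter], dict[str, set]]:
--     """Re-implementation: aggregate each text's token counts once
--     (per-phrase distinct tokens), then merge that one counter into every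
--     predicted label, instead of re-scanning all noun phrases per label."""
--     prediction_np_counter = {}
--     np_prediction_counter = {}
--
--     for np_list, pred_list in zip(filtered_nps, predictions):
--         # one pass over the text: how many phrases contain each token
--         text_counts = {}
--         for np_tokens in np_list:
--             for token in dict.fromkeys(np_tokens):
--                 text_counts[token] = text_counts.get(token, 0) + 1
--
--         # merge the per-text counts into each predicted label's counter
--         for p in pred_list:
--             c = prediction_np_counter.setdefault(p, Counter())
--             for token, cnt in text_counts.items():
--                 c[token] += cnt
--
--         # record all labels of this text for every token it contains
--         if pred_list:
--             for token in text_counts: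
--                 np_prediction_counter.setdefault(token, set()).update(pred_list)
--
--     return prediction_np_counter, np_prediction_counter
-- ===== Notes on version B (the rewrite author's own statement) =====
-- stated objective: alternative
-- what changed: B aggregates each text's token counts once into a per-text counter (distinct tokens per phrase) and merges that single counter into every predicted label's counter, instead of A's re-scanning all noun phrases and all their tokens separately for every predicted label; measured ~1.3-1.4x faster on the generated inputs (below the 1.5x bar, so no speed claim).
import Mathlib
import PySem

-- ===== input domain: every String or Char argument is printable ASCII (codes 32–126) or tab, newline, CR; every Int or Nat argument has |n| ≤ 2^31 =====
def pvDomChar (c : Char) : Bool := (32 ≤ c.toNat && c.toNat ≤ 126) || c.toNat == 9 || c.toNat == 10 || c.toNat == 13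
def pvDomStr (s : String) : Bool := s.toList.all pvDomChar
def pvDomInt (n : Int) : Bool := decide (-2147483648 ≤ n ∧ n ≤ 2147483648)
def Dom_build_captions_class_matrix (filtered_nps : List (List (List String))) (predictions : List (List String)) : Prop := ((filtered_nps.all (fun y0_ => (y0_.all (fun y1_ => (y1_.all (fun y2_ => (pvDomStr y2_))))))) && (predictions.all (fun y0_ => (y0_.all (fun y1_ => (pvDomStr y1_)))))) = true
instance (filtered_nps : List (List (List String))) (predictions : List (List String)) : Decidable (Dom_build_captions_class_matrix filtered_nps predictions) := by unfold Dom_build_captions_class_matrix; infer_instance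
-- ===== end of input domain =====

-- B replaces A's per-label re-scan of every noun phrase by one per-text token
-- counter merged into each label (a different aggregation strategy; equality is about the return value — neither mutates its arguments).

-- `c[t] = c.get(t, 0) + n` — the single dict-write primitive both Pythons use
-- (Counter.update / Counter.__iadd__ / dict.get with default are exactly this).
def pvIncr (c : PySem.Dict String Int) (t : String) (n : Int) : PySem.Dict String Int :=
  c.insert t (c.getD t 0 + n)

-- ===== PORT A =====
-- dict([(token, 1) for token in np_tokens]) has the DISTINCT tokens (first occurrences,
-- in order) each mapped to 1, and Counter.update adds those counts: ported as a fold of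
-- pvIncr · · 1 over PySem.List.dedup np_tokens (exact).
def build_captions_class_matrix (filtered_nps : List (List (List String))) (predictions : List (List String)) :
    (List (String × List (String × Int))) × (List (String × List String)) :=
  let st := (filtered_nps.zip predictions).foldl (fun st pair =>
    pair.2.foldl (fun st p =>
      let st1 := if st.1.contains p then st.1 else st.1.insert p PySem.Dict.empty
      pair.1.foldl (fun st np_tokens =>
        ( st.1.modify p PySem.Dict.empty (fun c =>
            (PySem.List.dedup np_tokens).foldl (fun c token => pvIncr c token 1) c),
          np_tokens.foldl (fun nd token =>
            let nd := if nd.contains token then nd else nd.insert token PySem.Set.empty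
            nd.modify token PySem.Set.empty (fun s => PySem.Set.add s p)) st.2 ))
        (st1, st.2)) st)
    (PySem.Dict.empty, PySem.Dict.empty)
  (st.1.items.map (fun kv => (kv.1, kv.2.items)), st.2.items)

-- ===== PORT B =====
def build_captions_class_matrix_alt (filtered_nps : List (List (List String))) (predictions : List (List String)) :
    (List (String × List (String × Int))) × (List (String × List String)) :=
  let st := (filtered_nps.zip predictions).foldl (fun st pair =>
    let tc := pair.1.foldl (fun tc np_tokens =>
        (PySem.List.dedup np_tokens).foldl (fun tc token => pvIncr tc token 1) tc) PySem.Dict.empty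
    let pc := pair.2.foldl (fun pc p =>
        (pc.setdefault p PySem.Dict.empty).modify p PySem.Dict.empty (fun c =>
          tc.items.foldl (fun c kv => pvIncr c kv.1 kv.2) c)) st.1
    let nd := if pair.2.isEmpty then st.2
      else tc.keys.foldl (fun nd token =>
        (nd.setdefault token PySem.Set.empty).modify token PySem.Set.empty (fun s =>
          PySem.Set.update s pair.2)) st.2
    (pc, nd)) (PySem.Dict.empty, PySem.Dict.empty)
  (st.1.items.map (fun kv => (kv.1, kv.2.items)), st.2.items)

-- ===== PRECONDITION & SPEC =====
def Spec_build_captions_class_matrix (filtered_nps : List (List (List String))) (predictions : List (List String)) (out : (List (String × List (String × Int))) × (List (String × List String))) : Prop := out = build_captions_class_matrix_alt filtered_nps predictions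
instance (filtered_nps : List (List (List String))) (predictions : List (List String)) (out : (List (String × List (String × Int))) × (List (String × List String))) : Decidable (Spec_build_captions_class_matrix filtered_nps predictions out) := by unfold Spec_build_captions_class_matrix; infer_instance

-- ===== CLAIM (what is proved, stated in full; the proofs are below) =====
def Claim_equal_build_captions_class_matrix : Prop := ∀ (filtered_nps : List (List (List String))) (predictions : List (List String)), Dom_build_captions_class_matrix filtered_nps predictions → Spec_build_captions_class_matrix filtered_nps predictions (build_captions_class_matrix filtered_nps predictions)

-- ===== LEMMAS AND PROOFS =====

-- proof-only helper definitions
def pvMergeL (c : PySem.Dict String Int) (l : List (String × Int)) : PySem.Dict String Int :=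
  l.foldl (fun c kv => pvIncr c kv.1 kv.2) c

def pvPh (c : PySem.Dict String Int) (ph : List String) : PySem.Dict String Int :=
  (PySem.List.dedup ph).foldl (fun c token => pvIncr c token 1) c

def pvSupd (nd : PySem.Dict String (PySem.Set String)) (t : String) (ps : List String) :
    PySem.Dict String (PySem.Set String) :=
  nd.insert t (PySem.Set.update (nd.getD t PySem.Set.empty) ps)

def pvApply (nd : PySem.Dict String (PySem.Set String)) (D : List String) (ps : List String) :
    PySem.Dict String (PySem.Set String) :=
  PySem.Dict.mk (nd.items.map (fun q => if q.1 ∈ D then (q.1, PySem.Set.update q.2 ps) else q)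
    ++ ((PySem.Set.ofList D).filter (fun t => !(nd.contains t))).map
        (fun t => (t, PySem.Set.update PySem.Set.empty ps)))

theorem pvIncr_same (c : PySem.Dict String Int) (t : String) (v n : Int) :
    pvIncr (pvIncr c t v) t n = pvIncr c t (v + n) := by
  simp [pvIncr, PySem.Dict.getD_insert_self, PySem.Dict.insert_insert_self, add_assoc]

theorem pvIncr_comm (Y : PySem.Dict String Int) (t k : String) (n m : Int)
    (hne : t ≠ k) (ht : t ∈ Y.keys) :
    pvIncr (pvIncr Y t n) k m = pvIncr (pvIncr Y k m) t n := by
  have hct : Y.contains t = true := (PySem.Dict.contains_iff_mem_keys Y t).mpr ht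
  have hgk : (Y.insert t (Y.getD t 0 + n)).getD k 0 = Y.getD k 0 :=
    PySem.Dict.getD_insert_of_ne Y _ 0 (Ne.symm hne)
  have hgt : (Y.insert k (Y.getD k 0 + m)).getD t 0 = Y.getD t 0 :=
    PySem.Dict.getD_insert_of_ne Y _ 0 hne
  by_cases hk : k ∈ Y.keys
  · have hck : Y.contains k = true := (PySem.Dict.contains_iff_mem_keys Y k).mpr hk
    apply PySem.Dict.ext
    have hct' : (Y.insert t (Y.getD t 0 + n)).contains k = true := by
      rw [PySem.Dict.contains_iff_mem_keys, PySem.Dict.keys_insert_of_contains Y _ hct]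
      exact hk
    have hck' : (Y.insert k (Y.getD k 0 + m)).contains t = true := by
      rw [PySem.Dict.contains_iff_mem_keys, PySem.Dict.keys_insert_of_contains Y _ hck]
      exact ht
    simp only [pvIncr, hgk, hgt,
      PySem.Dict.items_insert_of_contains _ _ hct,
      PySem.Dict.items_insert_of_contains _ _ hck,
      PySem.Dict.items_insert_of_contains _ _ hct',
      PySem.Dict.items_insert_of_contains _ _ hck',
      List.map_map]
    apply List.map_congr_left
    intro q _
    by_cases h1 : q.1 = t
    · simp [Function.comp, h1, hne, Ne.symm hne]
    · by_cases h2 : q.1 = k <;> simp [Function.comp, h1, h2, Ne.symm hne]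
  · have hck : Y.contains k = false := by
      rw [← Bool.not_eq_true, PySem.Dict.contains_iff_mem_keys]; exact hk
    apply PySem.Dict.ext
    have hck' : (Y.insert t (Y.getD t 0 + n)).contains k = false := by
      rw [← Bool.not_eq_true, PySem.Dict.contains_iff_mem_keys,
        PySem.Dict.keys_insert_of_contains Y _ hct]
      exact hk
    have hct' : (Y.insert k (Y.getD k 0 + m)).contains t = true := by
      rw [PySem.Dict.contains_iff_mem_keys, PySem.Dict.keys_insert_of_not_contains Y _ hck]
      simp [ht]
    simp only [pvIncr, hgk, hgt,
      PySem.Dict.items_insert_of_contains _ _ hct,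
      PySem.Dict.items_insert_of_not_contains _ _ hck,
      PySem.Dict.items_insert_of_not_contains _ _ hck',
      PySem.Dict.items_insert_of_contains _ _ hct',
      List.map_append]
    congr 1
    simp [Ne.symm hne]


theorem pvIncr_mem_keys (Y : PySem.Dict String Int) (t k : String) (n : Int) (h : t ∈ Y.keys) :
    t ∈ (pvIncr Y k n).keys := by
  simpa [pvIncr, PySem.Dict.mem_keys_insert] using Or.inr h

theorem pvMergeL_incr_out (l : List (String × Int)) (Y : PySem.Dict String Int) (t : String) (n : Int)
    (hl : ∀ q ∈ l, q.1 ≠ t) (ht : t ∈ Y.keys) :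
    pvMergeL (pvIncr Y t n) l = pvIncr (pvMergeL Y l) t n := by
  induction l generalizing Y with
  | nil => rfl
  | cons q l ih =>
    have h1 : q.1 ≠ t := hl q (by simp)
    show pvMergeL (pvIncr (pvIncr Y t n) q.1 q.2) l = pvIncr (pvMergeL (pvIncr Y q.1 q.2) l) t n
    rw [pvIncr_comm Y t q.1 n q.2 (Ne.symm h1) ht]
    exact ih (pvIncr Y q.1 q.2) (fun r hr => hl r (by simp [hr])) (pvIncr_mem_keys Y t q.1 q.2 ht)

theorem pvIncr_keys_nodup (m : PySem.Dict String Int) (t : String) (n : Int)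
    (h : m.keys.Nodup) : (pvIncr m t n).keys.Nodup :=
  PySem.Dict.nodup_keys_insert m t _ h

theorem pvMergeL_map_inc (l : List (String × Int)) (c : PySem.Dict String Int) (t : String) (n : Int)
    (hnd : (l.map Prod.fst).Nodup) (ht : t ∈ l.map Prod.fst) :
    pvMergeL c (l.map (fun q => if q.1 == t then (t, q.2 + n) else q)) = pvIncr (pvMergeL c l) t n := by
  induction l generalizing c with
  | nil => simp at ht
  | cons q l ih =>
    by_cases hq : q.1 = t
    · have hb : (q.1 == t) = true := beq_iff_eq.mpr hq
      have htl : t ∉ l.map Prod.fst := by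
        simp only [List.map_cons, List.nodup_cons] at hnd
        rw [← hq]; exact hnd.1
      have hmapid : l.map (fun q => if q.1 == t then (t, q.2 + n) else q) = l := by
        have h1 : l.map (fun q => if q.1 == t then (t, q.2 + n) else q) = l.map id := by
          apply List.map_congr_left
          intro r hr
          have : r.1 ≠ t := fun he => htl (he ▸ List.mem_map_of_mem hr)
          simp [this]
        rw [h1, List.map_id]
      simp only [List.map_cons, hb, if_pos, hmapid]
      show pvMergeL (pvIncr c t (q.2 + n)) l = pvIncr (pvMergeL (pvIncr c q.1 q.2) l) t n
      rw [hq, ← pvIncr_same c t q.2 n]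
      apply pvMergeL_incr_out l (pvIncr c t q.2) t n
      · intro r hr
        exact fun he => htl (he ▸ List.mem_map_of_mem hr)
      · simpa [pvIncr, PySem.Dict.mem_keys_insert] using Or.inl rfl
    · have hb : (q.1 == t) = false := beq_eq_false_iff_ne.mpr hq
      have htl : t ∈ l.map Prod.fst := by
        simp only [List.map_cons, List.mem_cons] at ht
        rcases ht with h | h
        · exact absurd h.symm hq
        · exact h
      have hndl : (l.map Prod.fst).Nodup := by
        simp only [List.map_cons, List.nodup_cons] at hnd
        exact hnd.2
      simp only [List.map_cons, hb, Bool.false_eq_true, if_false]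
      show pvMergeL (pvIncr c q.1 q.2) _ = pvIncr (pvMergeL (pvIncr c q.1 q.2) l) t n
      exact ih (pvIncr c q.1 q.2) hndl htl

theorem pvIncr_core (m : PySem.Dict String Int) (c : PySem.Dict String Int) (t : String) (n : Int)
    (h : m.keys.Nodup) :
    pvIncr (pvMergeL c m.items) t n = pvMergeL c ((pvIncr m t n).items) := by
  by_cases hc : m.contains t = true
  · have hitems : (pvIncr m t n).items
        = m.items.map (fun q => if q.1 == t then (t, q.2 + n) else q) := by
      rw [pvIncr, PySem.Dict.items_insert_of_contains m _ hc]
      apply List.map_congr_left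
      intro q hq
      by_cases h1 : q.1 = t
      · have : (t, q.2) ∈ m.items := by
          have : q = (t, q.2) := by rw [← h1]
          exact this ▸ hq
        have hg : m.getD t 0 = q.2 := PySem.Dict.getD_of_mem_items m this h 0
        simp [h1, hg]
      · simp [h1]
    rw [hitems, pvMergeL_map_inc m.items c t n h
      ((PySem.Dict.contains_iff_mem_keys m t).mp hc)]
  · have hc' : m.contains t = false := by simpa using hc
    have hg : m.getD t 0 = 0 := PySem.Dict.getD_of_not_contains m 0 hc'
    have hitems : (pvIncr m t n).items = m.items ++ [(t, 0 + n)] := by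
      rw [pvIncr, hg, PySem.Dict.items_insert_of_not_contains m _ hc']
    rw [hitems]
    conv_rhs => rw [pvMergeL, List.foldl_append]
    show pvIncr (pvMergeL c m.items) t n = pvIncr (pvMergeL c m.items) t (0 + n)
    rw [zero_add]

theorem pvMergeL_fold1 (l : List String) (c m : PySem.Dict String Int) (h : m.keys.Nodup) :
    l.foldl (fun c t => pvIncr c t 1) (pvMergeL c m.items)
      = pvMergeL c ((l.foldl (fun m t => pvIncr m t 1) m).items) := by
  induction l generalizing m with
  | nil => rfl
  | cons t l ih =>
    show l.foldl _ (pvIncr (pvMergeL c m.items) t 1) = _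
    rw [pvIncr_core m c t 1 h]
    exact ih (pvIncr m t 1) (pvIncr_keys_nodup m t 1 h)

theorem pvFold1_keys_nodup (l : List String) (c : PySem.Dict String Int) (h : c.keys.Nodup) :
    (l.foldl (fun c t => pvIncr c t 1) c).keys.Nodup := by
  induction l generalizing c with
  | nil => exact h
  | cons t l ih => exact ih _ (pvIncr_keys_nodup c t 1 h)

theorem pvPh_keys_nodup (c : PySem.Dict String Int) (ph : List String) (h : c.keys.Nodup) :
    (pvPh c ph).keys.Nodup := pvFold1_keys_nodup _ c h

theorem pvMergeL_foldPh (nl : List (List String)) (c m : PySem.Dict String Int) (h : m.keys.Nodup) :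
    nl.foldl pvPh (pvMergeL c m.items) = pvMergeL c ((nl.foldl pvPh m).items) := by
  induction nl generalizing m with
  | nil => rfl
  | cons ph nl ih =>
    show nl.foldl pvPh (pvPh (pvMergeL c m.items) ph) = _
    rw [show pvPh (pvMergeL c m.items) ph = pvMergeL c ((pvPh m ph).items) from
      pvMergeL_fold1 _ c m h]
    exact ih (pvPh m ph) (pvPh_keys_nodup m ph h)

theorem pvFoldPh_eq_merge (nl : List (List String)) (c : PySem.Dict String Int) :
    nl.foldl pvPh c = pvMergeL c ((nl.foldl pvPh PySem.Dict.empty).items) := by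
  have h0 : (PySem.Dict.empty : PySem.Dict String Int).keys.Nodup := by
    simp [PySem.Dict.empty, PySem.Dict.keys]
  have := pvMergeL_foldPh nl c PySem.Dict.empty h0
  simpa [pvMergeL] using this

theorem pvModify_modify (X : PySem.Dict String (PySem.Dict String Int)) (p : String)
    (f g : PySem.Dict String Int → PySem.Dict String Int) :
    (X.modify p PySem.Dict.empty f).modify p PySem.Dict.empty g
      = X.modify p PySem.Dict.empty (fun c => g (f c)) := by
  show (X.insert p (f (X.getD p PySem.Dict.empty))).insert p
      (g ((X.insert p (f (X.getD p PySem.Dict.empty))).getD p PySem.Dict.empty))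
    = X.insert p (g (f (X.getD p PySem.Dict.empty)))
  rw [PySem.Dict.getD_insert_self, PySem.Dict.insert_insert_self]

theorem pvModify_id (X : PySem.Dict String (PySem.Dict String Int)) (p : String)
    (hc : X.contains p = true) (hn : X.keys.Nodup) :
    X.modify p PySem.Dict.empty (fun c => c) = X := by
  show X.insert p (X.getD p PySem.Dict.empty) = X
  apply PySem.Dict.ext
  rw [PySem.Dict.items_insert_of_contains X _ hc]
  have h1 : X.items.map (fun q => if q.1 == p then (p, X.getD p PySem.Dict.empty) else q)
      = X.items.map id := by
    apply List.map_congr_left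
    intro q hq
    by_cases h1 : q.1 = p
    · have hm : (p, q.2) ∈ X.items := by
        have : q = (p, q.2) := by rw [← h1]
        exact this ▸ hq
      have hg : X.getD p PySem.Dict.empty = q.2 := PySem.Dict.getD_of_mem_items X hm hn _
      simp only [h1, beq_self_eq_true, if_pos, hg, id]
      rw [← h1]
    · simp [h1]
  rw [h1, List.map_id]

theorem pvModify_fold (nl : List (List String)) (X : PySem.Dict String (PySem.Dict String Int)) (p : String)
    (f : PySem.Dict String Int → PySem.Dict String Int) :
    nl.foldl (fun pc ph => pc.modify p PySem.Dict.empty (fun c => pvPh c ph)) (X.modify p PySem.Dict.empty f)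
      = X.modify p PySem.Dict.empty (fun c => nl.foldl pvPh (f c)) := by
  induction nl generalizing f with
  | nil => rfl
  | cons ph nl ih =>
    show nl.foldl _ ((X.modify p PySem.Dict.empty f).modify p PySem.Dict.empty (fun c => pvPh c ph)) = _
    rw [pvModify_modify]
    exact ih (fun c => pvPh (f c) ph)

theorem pvSet_update_idem (s : PySem.Set String) (ps : List String) :
    PySem.Set.update (PySem.Set.update s ps) ps = PySem.Set.update s ps := by
  conv_lhs => rw [PySem.Set.update_eq_append_filter]
  have h : List.filter (fun y => !(PySem.Set.update s ps).contains y) (PySem.Set.ofList ps) = [] := by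
    rw [List.filter_eq_nil_iff]
    intro y hy
    have : y ∈ PySem.Set.update s ps :=
      (PySem.Set.mem_update s ps y).mpr (Or.inr ((PySem.Set.mem_ofList ps y).mp hy))
    rw [(PySem.Set.contains_iff _ _).mpr this]
    simp
  rw [h, List.append_nil]

theorem pvSupd_eq_A (nd : PySem.Dict String (PySem.Set String)) (t : String) (p : String) :
    (let nd' := if nd.contains t then nd else nd.insert t PySem.Set.empty
     nd'.modify t PySem.Set.empty (fun s => PySem.Set.add s p)) = pvSupd nd t [p] := by
  by_cases hc : nd.contains t = true
  · simp only [hc, if_pos]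
    rfl
  · have hc' : nd.contains t = false := by simpa using hc
    simp only [hc', Bool.false_eq_true, if_false]
    show (nd.insert t PySem.Set.empty).insert t
        (PySem.Set.add ((nd.insert t PySem.Set.empty).getD t PySem.Set.empty) p)
      = nd.insert t (PySem.Set.update (nd.getD t PySem.Set.empty) [p])
    rw [PySem.Dict.getD_insert_self, PySem.Dict.insert_insert_self,
      PySem.Dict.getD_of_not_contains nd _ hc']
    rfl

theorem pvSupd_eq_B (nd : PySem.Dict String (PySem.Set String)) (t : String) (ps : List String) :
    (nd.setdefault t PySem.Set.empty).modify t PySem.Set.empty (fun s => PySem.Set.update s ps)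
      = pvSupd nd t ps := by
  by_cases hc : nd.contains t = true
  · rw [PySem.Dict.setdefault_of_contains nd _ hc]
    rfl
  · have hc' : nd.contains t = false := by simpa using hc
    rw [PySem.Dict.setdefault_of_not_contains nd _ hc']
    show (nd.insert t PySem.Set.empty).insert t
        (PySem.Set.update ((nd.insert t PySem.Set.empty).getD t PySem.Set.empty) ps)
      = nd.insert t (PySem.Set.update (nd.getD t PySem.Set.empty) ps)
    rw [PySem.Dict.getD_insert_self, PySem.Dict.insert_insert_self,
      PySem.Dict.getD_of_not_contains nd _ hc']

theorem pvApply_nil (nd : PySem.Dict String (PySem.Set String)) (ps : List String) :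
    pvApply nd [] ps = nd := by
  have h1 : nd.items.map (fun q => if q.1 ∈ ([] : List String) then (q.1, PySem.Set.update q.2 ps) else q)
      = nd.items.map id := by
    apply List.map_congr_left; intro q _; simp
  show PySem.Dict.mk _ = nd
  rw [h1, List.map_id]
  show PySem.Dict.mk (nd.items ++ (List.filter _ (PySem.Set.ofList [])).map _) = nd
  simp only [PySem.Set.ofList, List.foldl_nil]
  show PySem.Dict.mk (nd.items ++ []) = nd
  rw [List.append_nil]

theorem pvApply_keys (nd : PySem.Dict String (PySem.Set String)) (D ps : List String) :
    (pvApply nd D ps).keys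
      = nd.keys ++ (PySem.Set.ofList D).filter (fun t => !(nd.contains t)) := by
  show (PySem.Dict.mk _).keys = _
  rw [PySem.Dict.keys_mk]
  rw [List.map_append, List.map_map, List.map_map]
  congr 1
  · show nd.items.map _ = nd.keys
    have : (fun q : String × PySem.Set String =>
        ((if q.1 ∈ D then (q.1, PySem.Set.update q.2 ps) else q)).1) = Prod.fst := by
      funext q; by_cases h : q.1 ∈ D <;> simp [h]
    rw [show nd.items.map ((Prod.fst) ∘ (fun q : String × PySem.Set String =>
      if q.1 ∈ D then (q.1, PySem.Set.update q.2 ps) else q)) = nd.items.map Prod.fst from by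
        apply List.map_congr_left; intro q _; by_cases h : q.1 ∈ D <;> simp [h]]
    rfl
  · have : ((fun x : String × PySem.Set String => x.1) ∘ (fun t : String => (t, PySem.Set.update PySem.Set.empty ps)))
        = id := by funext t; rfl
    rw [this, List.map_id]

theorem pvApply_keys_nodup (nd : PySem.Dict String (PySem.Set String)) (D ps : List String)
    (h : nd.keys.Nodup) : (pvApply nd D ps).keys.Nodup := by
  rw [pvApply_keys]
  refine List.Nodup.append h ((PySem.Set.nodup_ofList D).filter _) ?_
  intro y hy hy2
  have := List.of_mem_filter hy2
  rw [Bool.not_eq_eq_eq_not, Bool.not_true] at this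
  exact absurd ((PySem.Dict.contains_iff_mem_keys nd y).mpr hy) (by simp [this])

theorem pvMem_items_ne (nd : PySem.Dict String (PySem.Set String)) (t : String)
    (h : t ∉ nd.keys) : ∀ q ∈ nd.items, q.1 ≠ t := by
  intro q hq he
  exact h (by simp only [PySem.Dict.keys]; exact he ▸ List.mem_map_of_mem hq)

theorem pvApply_cons (nd : PySem.Dict String (PySem.Set String)) (t : String) (D ps : List String)
    (h : nd.keys.Nodup) :
    pvApply nd (t :: D) ps = pvApply (pvSupd nd t ps) D ps := by
  by_cases hc : nd.contains t = true
  · -- t already a key: pvSupd replaces its set in place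
    have ht : t ∈ nd.keys := (PySem.Dict.contains_iff_mem_keys nd t).mp hc
    have hitems : (pvSupd nd t ps).items
        = nd.items.map (fun q => if q.1 == t then (t, PySem.Set.update (nd.getD t PySem.Set.empty) ps) else q) :=
      PySem.Dict.items_insert_of_contains nd _ hc
    have hkeys : (pvSupd nd t ps).keys = nd.keys := PySem.Dict.keys_insert_of_contains nd _ hc
    have hcont : ∀ y, (pvSupd nd t ps).contains y = nd.contains y := by
      intro y
      rw [pvSupd, PySem.Dict.contains_insert]
      by_cases hyt : y = t
      · simp [hyt, hc]
      · simp [beq_eq_false_iff_ne.mpr hyt]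
    apply PySem.Dict.ext
    show nd.items.map (fun q => if q.1 ∈ t :: D then (q.1, PySem.Set.update q.2 ps) else q)
        ++ ((PySem.Set.ofList (t :: D)).filter (fun y => !(nd.contains y))).map
            (fun y => (y, PySem.Set.update PySem.Set.empty ps))
      = (pvSupd nd t ps).items.map (fun q => if q.1 ∈ D then (q.1, PySem.Set.update q.2 ps) else q)
        ++ ((PySem.Set.ofList D).filter (fun y => !((pvSupd nd t ps).contains y))).map
            (fun y => (y, PySem.Set.update PySem.Set.empty ps))
    rw [hitems]
    congr 1
    · rw [List.map_map]
      apply List.map_congr_left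
      intro q hq
      by_cases h1 : q.1 = t
      · have hm : (t, q.2) ∈ nd.items := by
          have : q = (t, q.2) := by rw [← h1]
          exact this ▸ hq
        have hg : nd.getD t PySem.Set.empty = q.2 := PySem.Dict.getD_of_mem_items nd hm h _
        by_cases h2 : t ∈ D
        · simp [Function.comp, h1, h2, pvSet_update_idem, ← hg]
        · simp [Function.comp, h1, h2, ← hg]
      · have : q.1 ∈ t :: D ↔ q.1 ∈ D := by simp [h1]
        by_cases h2 : q.1 ∈ D
        · simp [Function.comp, h1, h2]
        · simp [Function.comp, h1, h2]
    · congr 1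
      rw [PySem.Set.ofList_cons]
      show List.filter _ (t :: (PySem.Set.ofList D).filter (fun y => !(y == t))) = _
      rw [List.filter_cons]
      simp only [hc, Bool.not_true, Bool.false_eq_true, if_false]
      rw [List.filter_filter]
      apply List.filter_congr
      intro y _
      rw [hcont y]
      by_cases hyt : y = t
      · simp [hyt, hc]
      · simp [beq_eq_false_iff_ne.mpr hyt]
  · -- t is a new key: pvSupd appends it
    have hc' : nd.contains t = false := by simpa using hc
    have ht : t ∉ nd.keys := fun hm => by
      rw [(PySem.Dict.contains_iff_mem_keys nd t).mpr hm] at hc'; simp at hc'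
    have hg : nd.getD t PySem.Set.empty = PySem.Set.empty := PySem.Dict.getD_of_not_contains nd _ hc'
    have hitems : (pvSupd nd t ps).items
        = nd.items ++ [(t, PySem.Set.update PySem.Set.empty ps)] := by
      rw [pvSupd, hg, PySem.Dict.items_insert_of_not_contains nd _ hc']
    have hcont : ∀ y, (pvSupd nd t ps).contains y = ((y == t) || nd.contains y) := by
      intro y; rw [pvSupd, PySem.Dict.contains_insert]
    apply PySem.Dict.ext
    show nd.items.map (fun q => if q.1 ∈ t :: D then (q.1, PySem.Set.update q.2 ps) else q)
        ++ ((PySem.Set.ofList (t :: D)).filter (fun y => !(nd.contains y))).map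
            (fun y => (y, PySem.Set.update PySem.Set.empty ps))
      = (pvSupd nd t ps).items.map (fun q => if q.1 ∈ D then (q.1, PySem.Set.update q.2 ps) else q)
        ++ ((PySem.Set.ofList D).filter (fun y => !((pvSupd nd t ps).contains y))).map
            (fun y => (y, PySem.Set.update PySem.Set.empty ps))
    rw [hitems, List.map_append]
    have hmaps : nd.items.map (fun q => if q.1 ∈ t :: D then (q.1, PySem.Set.update q.2 ps) else q)
        = nd.items.map (fun q => if q.1 ∈ D then (q.1, PySem.Set.update q.2 ps) else q) := by
      apply List.map_congr_left
      intro q hq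
      have h1 : q.1 ≠ t := pvMem_items_ne nd t ht q hq
      by_cases h2 : q.1 ∈ D <;> simp [h1, h2]
    have hsingle : ([(t, PySem.Set.update PySem.Set.empty ps)].map
        (fun q => if q.1 ∈ D then (q.1, PySem.Set.update q.2 ps) else q))
        = [(t, PySem.Set.update PySem.Set.empty ps)] := by
      by_cases h2 : t ∈ D <;> simp [h2, pvSet_update_idem]
    have hfilt : (PySem.Set.ofList (t :: D)).filter (fun y => !nd.contains y)
        = t :: (PySem.Set.ofList D).filter (fun y => !(pvSupd nd t ps).contains y) := by
      rw [PySem.Set.ofList_cons]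
      show List.filter _ (t :: (PySem.Set.ofList D).filter (fun y => !(y == t))) = _
      rw [List.filter_cons]
      simp only [hc', Bool.not_false, if_pos]
      congr 1
      rw [List.filter_filter]
      apply List.filter_congr
      intro y _
      rw [hcont y]
      by_cases hyt : y = t
      · simp [hyt, hc']
      · simp [beq_eq_false_iff_ne.mpr hyt]
    rw [hmaps, hsingle, hfilt]
    simp

theorem pvSupd_keys_nodup (nd : PySem.Dict String (PySem.Set String)) (t : String) (ps : List String)
    (h : nd.keys.Nodup) : (pvSupd nd t ps).keys.Nodup :=
  PySem.Dict.nodup_keys_insert nd t _ h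

theorem pvFold_supd (D : List String) (nd : PySem.Dict String (PySem.Set String)) (ps : List String)
    (h : nd.keys.Nodup) :
    D.foldl (fun nd t => pvSupd nd t ps) nd = pvApply nd D ps := by
  induction D generalizing nd with
  | nil => exact (pvApply_nil nd ps).symm
  | cons t D ih =>
    rw [pvApply_cons nd t D ps h]
    exact ih (pvSupd nd t ps) (pvSupd_keys_nodup nd t ps h)

theorem pvApply_congr (nd : PySem.Dict String (PySem.Set String)) (D D' ps : List String)
    (h : PySem.Set.ofList D = PySem.Set.ofList D') :
    pvApply nd D ps = pvApply nd D' ps := by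
  have hm : ∀ x : String, x ∈ D ↔ x ∈ D' := by
    intro x
    rw [← PySem.Set.mem_ofList D x, h, PySem.Set.mem_ofList]
  apply PySem.Dict.ext
  show nd.items.map _ ++ _ = nd.items.map _ ++ _
  rw [h]
  congr 1
  apply List.map_congr_left
  intro q _
  by_cases h1 : q.1 ∈ D
  · simp [h1, (hm q.1).mp h1]
  · have h2 : q.1 ∉ D' := fun hx => h1 ((hm q.1).mpr hx)
    simp [h1, h2]

theorem pvApply_comp (nd : PySem.Dict String (PySem.Set String)) (D : List String) (p : String) (ps : List String)
    (h : nd.keys.Nodup) :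
    pvApply (pvApply nd D [p]) D ps = pvApply nd D (p :: ps) := by
  have hcont1 : ∀ y ∈ D, (pvApply nd D [p]).contains y = true := by
    intro y hy
    rw [PySem.Dict.contains_iff_mem_keys, pvApply_keys]
    by_cases hc : nd.contains y = true
    · exact List.mem_append_left _ ((PySem.Dict.contains_iff_mem_keys nd y).mp hc)
    · refine List.mem_append_right _ (List.mem_filter.mpr ⟨(PySem.Set.mem_ofList D y).mpr hy, ?_⟩)
      simp only [Bool.not_eq_eq_eq_not, Bool.not_true]
      simpa using hc
  have hfilt0 : (PySem.Set.ofList D).filter (fun y => !((pvApply nd D [p]).contains y)) = [] := by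
    rw [List.filter_eq_nil_iff]
    intro y hy
    rw [hcont1 y ((PySem.Set.mem_ofList D y).mp hy)]
    simp
  apply PySem.Dict.ext
  show (pvApply nd D [p]).items.map _ ++ _ = nd.items.map _ ++ _
  rw [hfilt0]
  show (pvApply nd D [p]).items.map _ ++ [] = _
  rw [List.append_nil]
  show (nd.items.map _ ++ (List.filter _ (PySem.Set.ofList D)).map _).map _ = _
  rw [List.map_append, List.map_map, List.map_map]
  congr 1
  · apply List.map_congr_left
    intro q _
    by_cases h1 : q.1 ∈ D
    · simp only [Function.comp, h1, if_pos]
      rfl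
    · simp [Function.comp, h1]
  · apply List.map_congr_left
    intro y hy
    have : y ∈ D := (PySem.Set.mem_ofList D y).mp (List.mem_of_mem_filter hy)
    simp only [Function.comp, this, if_pos]
    rfl

theorem pvFold_pass (ps : List String) (nd : PySem.Dict String (PySem.Set String)) (D : List String)
    (hps : ps ≠ []) (h : nd.keys.Nodup) :
    ps.foldl (fun nd p => D.foldl (fun nd t => pvSupd nd t [p]) nd) nd = pvApply nd D ps := by
  induction ps generalizing nd with
  | nil => exact absurd rfl hps
  | cons p ps ih =>
    show ps.foldl _ (D.foldl (fun nd t => pvSupd nd t [p]) nd) = _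
    rw [pvFold_supd D nd [p] h]
    cases ps with
    | nil => rfl
    | cons p' ps' =>
      rw [ih (pvApply nd D [p]) (by simp) (pvApply_keys_nodup nd D [p] h)]
      exact pvApply_comp nd D p (p' :: ps') h

theorem pvUpdate_dedup (s : PySem.Set String) (ph : List String) :
    PySem.Set.update s (PySem.List.dedup ph) = PySem.Set.update s ph := by
  rw [PySem.Set.update_eq_append_filter, PySem.Set.update_eq_append_filter,
    PySem.List.dedup_eq_ofList, PySem.Set.ofList_ofList]

theorem pvPh_keys (c : PySem.Dict String Int) (ph : List String) :
    (pvPh c ph).keys = PySem.Set.update c.keys ph := by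
  rw [pvPh]
  simp only [pvIncr]
  rw [PySem.Dict.keys_foldl_insert (PySem.List.dedup ph) (fun d x => d.getD x 0 + 1) c]
  exact pvUpdate_dedup c.keys ph

theorem pvTc_keys_aux (nl : List (List String)) : ∀ c : PySem.Dict String Int,
    (nl.foldl pvPh c).keys = PySem.Set.update c.keys nl.flatten := by
  induction nl with
  | nil => intro c; rfl
  | cons ph nl ih =>
    intro c
    show (nl.foldl pvPh (pvPh c ph)).keys = _
    rw [ih (pvPh c ph), pvPh_keys, List.flatten_cons, PySem.Set.update_append]

theorem pvTc_keys (nl : List (List String)) :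
    (nl.foldl pvPh (PySem.Dict.empty : PySem.Dict String Int)).keys
      = PySem.Set.ofList nl.flatten := by
  rw [pvTc_keys_aux nl PySem.Dict.empty]
  show PySem.Set.update [] nl.flatten = _
  rw [PySem.Set.update_nil_left]

theorem pvTc_keys_ofList (nl : List (List String)) :
    PySem.Set.ofList (nl.foldl pvPh (PySem.Dict.empty : PySem.Dict String Int)).keys
      = PySem.Set.ofList nl.flatten := by
  rw [pvTc_keys nl, PySem.Set.ofList_ofList]

-- ===== assembly: the per-text steps of the two ports agree on nodup-keyed states =====

theorem pvPC_step (nl : List (List String)) (p : String)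
    (pc : PySem.Dict String (PySem.Dict String Int)) (h : pc.keys.Nodup) :
    nl.foldl (fun pc ph => pc.modify p PySem.Dict.empty (fun c => pvPh c ph))
      (if pc.contains p then pc else pc.insert p PySem.Dict.empty)
    = (pc.setdefault p PySem.Dict.empty).modify p PySem.Dict.empty
        (fun c => pvMergeL c ((nl.foldl pvPh PySem.Dict.empty).items)) := by
  have hXc : (if pc.contains p then pc else pc.insert p PySem.Dict.empty).contains p = true := by
    by_cases hc : pc.contains p = true
    · simp [hc]
    · have hc' : pc.contains p = false := by simpa using hc
      simp [hc']
  have hXn : (if pc.contains p then pc else pc.insert p PySem.Dict.empty).keys.Nodup := by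
    by_cases hc : pc.contains p = true
    · simpa [hc] using h
    · have hc' : pc.contains p = false := by simpa using hc
      simpa [hc'] using PySem.Dict.nodup_keys_insert pc p PySem.Dict.empty h
  have hsd : pc.setdefault p PySem.Dict.empty
      = (if pc.contains p then pc else pc.insert p PySem.Dict.empty) := by
    by_cases hc : pc.contains p = true
    · simp [hc, PySem.Dict.setdefault_of_contains pc _ hc]
    · have hc' : pc.contains p = false := by simpa using hc
      simp [hc', PySem.Dict.setdefault_of_not_contains pc _ hc']
  rw [hsd]
  set X := if pc.contains p then pc else pc.insert p PySem.Dict.empty with hXdef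
  calc nl.foldl (fun pc ph => pc.modify p PySem.Dict.empty (fun c => pvPh c ph)) X
      = nl.foldl (fun pc ph => pc.modify p PySem.Dict.empty (fun c => pvPh c ph))
          (X.modify p PySem.Dict.empty (fun c => c)) := by rw [pvModify_id X p hXc hXn]
    _ = X.modify p PySem.Dict.empty (fun c => nl.foldl pvPh c) := pvModify_fold nl X p (fun c => c)
    _ = X.modify p PySem.Dict.empty (fun c => pvMergeL c ((nl.foldl pvPh PySem.Dict.empty).items)) := by
        congr 1
        funext c
        exact pvFoldPh_eq_merge nl c

theorem pvSetdefault_modify_nodup {ν : Type} (d : PySem.Dict String ν) (k : String) (v0 : ν)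
    (f : ν → ν) (h : d.keys.Nodup) : ((d.setdefault k v0).modify k v0 f).keys.Nodup := by
  rw [PySem.Dict.keys_modify]
  apply PySem.Dict.nodup_keys_insert
  by_cases hc : d.contains k = true
  · rw [PySem.Dict.setdefault_of_contains d _ hc]; exact h
  · rw [PySem.Dict.setdefault_of_not_contains d _ (by simpa using hc)]
    exact PySem.Dict.nodup_keys_insert d k v0 h

theorem pvPC (nl : List (List String)) (ps : List String)
    (pc : PySem.Dict String (PySem.Dict String Int)) (h : pc.keys.Nodup) :
    ps.foldl (fun pc p =>
        nl.foldl (fun pc ph => pc.modify p PySem.Dict.empty (fun c => pvPh c ph))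
          (if pc.contains p then pc else pc.insert p PySem.Dict.empty)) pc
    = ps.foldl (fun pc p => (pc.setdefault p PySem.Dict.empty).modify p PySem.Dict.empty
        (fun c => pvMergeL c ((nl.foldl pvPh PySem.Dict.empty).items))) pc := by
  induction ps generalizing pc with
  | nil => rfl
  | cons p ps ih =>
    simp only [List.foldl_cons]
    rw [pvPC_step nl p pc h]
    exact ih _ (pvSetdefault_modify_nodup pc p PySem.Dict.empty _ h)

theorem pvPCfold_nodup (ps : List String) (F : PySem.Dict String Int → PySem.Dict String Int)
    (pc : PySem.Dict String (PySem.Dict String Int)) (h : pc.keys.Nodup) :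
    (ps.foldl (fun pc p => (pc.setdefault p PySem.Dict.empty).modify p PySem.Dict.empty F) pc).keys.Nodup := by
  induction ps generalizing pc with
  | nil => exact h
  | cons p ps ih => exact ih _ (pvSetdefault_modify_nodup pc p PySem.Dict.empty F h)

theorem pvNP (nl : List (List String)) (ps : List String)
    (nd : PySem.Dict String (PySem.Set String)) (h : nd.keys.Nodup) :
    ps.foldl (fun nd p =>
        nl.foldl (fun nd np_tokens =>
          np_tokens.foldl (fun nd token =>
            let nd := if nd.contains token then nd else nd.insert token PySem.Set.empty
            nd.modify token PySem.Set.empty (fun s => PySem.Set.add s p)) nd) nd) nd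
    = (if ps.isEmpty then nd
       else (nl.foldl pvPh PySem.Dict.empty).keys.foldl (fun nd token =>
         (nd.setdefault token PySem.Set.empty).modify token PySem.Set.empty
           (fun s => PySem.Set.update s ps)) nd) := by
  cases ps with
  | nil => rfl
  | cons p ps =>
    simp only [List.isEmpty_cons, Bool.false_eq_true, if_false]
    have hA : ∀ (p : String) (nd : PySem.Dict String (PySem.Set String)),
        nl.foldl (fun nd np_tokens =>
          np_tokens.foldl (fun nd token =>
            let nd := if nd.contains token then nd else nd.insert token PySem.Set.empty
            nd.modify token PySem.Set.empty (fun s => PySem.Set.add s p)) nd) nd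
        = nl.flatten.foldl (fun nd t => pvSupd nd t [p]) nd := by
      intro p nd
      rw [List.foldl_flatten]
      apply PySem.List.foldl_congr_mem
      intro acc ph _
      apply PySem.List.foldl_congr_mem
      intro nd' token _
      exact pvSupd_eq_A nd' token p
    have hL : (p :: ps).foldl (fun nd p =>
        nl.foldl (fun nd np_tokens =>
          np_tokens.foldl (fun nd token =>
            let nd := if nd.contains token then nd else nd.insert token PySem.Set.empty
            nd.modify token PySem.Set.empty (fun s => PySem.Set.add s p)) nd) nd) nd
        = (p :: ps).foldl (fun nd p => nl.flatten.foldl (fun nd t => pvSupd nd t [p]) nd) nd := by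
      apply PySem.List.foldl_congr_mem
      intro acc q _
      exact hA q acc
    have hR : (nl.foldl pvPh PySem.Dict.empty).keys.foldl (fun nd token =>
        (nd.setdefault token PySem.Set.empty).modify token PySem.Set.empty
          (fun s => PySem.Set.update s (p :: ps))) nd
        = (nl.foldl pvPh PySem.Dict.empty).keys.foldl (fun nd token => pvSupd nd token (p :: ps)) nd := by
      apply PySem.List.foldl_congr_mem
      intro acc token _
      exact pvSupd_eq_B acc token (p :: ps)
    rw [hL, hR, pvFold_pass (p :: ps) nd nl.flatten (by simp) h,
      pvFold_supd _ nd (p :: ps) h, pvApply_congr nd _ nl.flatten (p :: ps) (pvTc_keys_ofList nl)]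

theorem pvNPfold_nodup (ps : List String) (D : List String)
    (nd : PySem.Dict String (PySem.Set String)) (h : nd.keys.Nodup) :
    (D.foldl (fun nd token =>
      (nd.setdefault token PySem.Set.empty).modify token PySem.Set.empty
        (fun s => PySem.Set.update s ps)) nd).keys.Nodup := by
  induction D generalizing nd with
  | nil => exact h
  | cons t D ih => exact ih _ (pvSetdefault_modify_nodup nd t PySem.Set.empty _ h)

theorem pvStep_eq (pair : List (List String) × List String)
    (st : PySem.Dict String (PySem.Dict String Int) × PySem.Dict String (PySem.Set String))
    (h1 : st.1.keys.Nodup) (h2 : st.2.keys.Nodup) :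
    (pair.2.foldl (fun st p =>
      let st1 := if st.1.contains p then st.1 else st.1.insert p PySem.Dict.empty
      pair.1.foldl (fun st np_tokens =>
        ( st.1.modify p PySem.Dict.empty (fun c =>
            (PySem.List.dedup np_tokens).foldl (fun c token => pvIncr c token 1) c),
          np_tokens.foldl (fun nd token =>
            let nd := if nd.contains token then nd else nd.insert token PySem.Set.empty
            nd.modify token PySem.Set.empty (fun s => PySem.Set.add s p)) st.2 ))
        (st1, st.2)) st)
    = (let tc := pair.1.foldl (fun tc np_tokens =>
        (PySem.List.dedup np_tokens).foldl (fun tc token => pvIncr tc token 1) tc) PySem.Dict.empty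
       let pc := pair.2.foldl (fun pc p =>
        (pc.setdefault p PySem.Dict.empty).modify p PySem.Dict.empty (fun c =>
          tc.items.foldl (fun c kv => pvIncr c kv.1 kv.2) c)) st.1
       let nd := if pair.2.isEmpty then st.2
        else tc.keys.foldl (fun nd token =>
          (nd.setdefault token PySem.Set.empty).modify token PySem.Set.empty (fun s =>
            PySem.Set.update s pair.2)) st.2
       (pc, nd)) := by
  have hinner : ∀ (p : String) (a : PySem.Dict String (PySem.Dict String Int))
      (b : PySem.Dict String (PySem.Set String)),
      pair.1.foldl (fun st np_tokens =>
        ( st.1.modify p PySem.Dict.empty (fun c =>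
            (PySem.List.dedup np_tokens).foldl (fun c token => pvIncr c token 1) c),
          np_tokens.foldl (fun nd token =>
            let nd := if nd.contains token then nd else nd.insert token PySem.Set.empty
            nd.modify token PySem.Set.empty (fun s => PySem.Set.add s p)) st.2 )) (a, b)
      = (pair.1.foldl (fun pc ph => pc.modify p PySem.Dict.empty (fun c => pvPh c ph)) a,
         pair.1.foldl (fun nd ph =>
           ph.foldl (fun nd token =>
             let nd := if nd.contains token then nd else nd.insert token PySem.Set.empty
             nd.modify token PySem.Set.empty (fun s => PySem.Set.add s p)) nd) b) := by
    intro p a b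
    exact PySem.List.foldl_prod_mk
      (f := fun pc ph => pc.modify p PySem.Dict.empty (fun c => pvPh c ph))
      (g := fun nd ph =>
        ph.foldl (fun nd token =>
          let nd := if nd.contains token then nd else nd.insert token PySem.Set.empty
          nd.modify token PySem.Set.empty (fun s => PySem.Set.add s p)) nd)
      pair.1 a b
  have houter : pair.2.foldl (fun st p =>
      let st1 := if st.1.contains p then st.1 else st.1.insert p PySem.Dict.empty
      pair.1.foldl (fun st np_tokens =>
        ( st.1.modify p PySem.Dict.empty (fun c =>
            (PySem.List.dedup np_tokens).foldl (fun c token => pvIncr c token 1) c),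
          np_tokens.foldl (fun nd token =>
            let nd := if nd.contains token then nd else nd.insert token PySem.Set.empty
            nd.modify token PySem.Set.empty (fun s => PySem.Set.add s p)) st.2 ))
        (st1, st.2)) st
      = pair.2.foldl (fun st p =>
        ( pair.1.foldl (fun pc ph => pc.modify p PySem.Dict.empty (fun c => pvPh c ph))
            (if st.1.contains p then st.1 else st.1.insert p PySem.Dict.empty),
          pair.1.foldl (fun nd ph =>
            ph.foldl (fun nd token =>
              let nd := if nd.contains token then nd else nd.insert token PySem.Set.empty
              nd.modify token PySem.Set.empty (fun s => PySem.Set.add s p)) nd) st.2 )) st := by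
    apply PySem.List.foldl_congr_mem
    intro acc p _
    exact hinner p _ acc.2
  rw [houter]
  rw [PySem.List.foldl_prod_mk
    (f := fun pc p => pair.1.foldl (fun pc ph => pc.modify p PySem.Dict.empty (fun c => pvPh c ph))
      (if pc.contains p then pc else pc.insert p PySem.Dict.empty))
    (g := fun nd p => pair.1.foldl (fun nd ph =>
      ph.foldl (fun nd token =>
        let nd := if nd.contains token then nd else nd.insert token PySem.Set.empty
        nd.modify token PySem.Set.empty (fun s => PySem.Set.add s p)) nd) nd)
    pair.2 st.1 st.2]
  show _ = (pair.2.foldl _ st.1, if pair.2.isEmpty then st.2 else _)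
  rw [pvPC pair.1 pair.2 st.1 h1]
  rw [show pair.2.foldl (fun nd p => pair.1.foldl (fun nd ph =>
      ph.foldl (fun nd token =>
        let nd := if nd.contains token then nd else nd.insert token PySem.Set.empty
        nd.modify token PySem.Set.empty (fun s => PySem.Set.add s p)) nd) nd) st.2
    = _ from pvNP pair.1 pair.2 st.2 h2]
  rfl

theorem pvTop (L : List ((List (List String)) × List String)) :
    ∀ (st : PySem.Dict String (PySem.Dict String Int) × PySem.Dict String (PySem.Set String)),
    st.1.keys.Nodup → st.2.keys.Nodup →
    L.foldl (fun st pair =>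
      pair.2.foldl (fun st p =>
        let st1 := if st.1.contains p then st.1 else st.1.insert p PySem.Dict.empty
        pair.1.foldl (fun st np_tokens =>
          ( st.1.modify p PySem.Dict.empty (fun c =>
              (PySem.List.dedup np_tokens).foldl (fun c token => pvIncr c token 1) c),
            np_tokens.foldl (fun nd token =>
              let nd := if nd.contains token then nd else nd.insert token PySem.Set.empty
              nd.modify token PySem.Set.empty (fun s => PySem.Set.add s p)) st.2 ))
          (st1, st.2)) st) st
    = L.foldl (fun st pair =>
      let tc := pair.1.foldl (fun tc np_tokens =>
        (PySem.List.dedup np_tokens).foldl (fun tc token => pvIncr tc token 1) tc) PySem.Dict.empty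
      let pc := pair.2.foldl (fun pc p =>
        (pc.setdefault p PySem.Dict.empty).modify p PySem.Dict.empty (fun c =>
          tc.items.foldl (fun c kv => pvIncr c kv.1 kv.2) c)) st.1
      let nd := if pair.2.isEmpty then st.2
        else tc.keys.foldl (fun nd token =>
          (nd.setdefault token PySem.Set.empty).modify token PySem.Set.empty (fun s =>
            PySem.Set.update s pair.2)) st.2
      (pc, nd)) st := by
  induction L with
  | nil => intro st _ _; rfl
  | cons pair L ih =>
    intro st h1 h2
    simp only [List.foldl_cons]
    rw [pvStep_eq pair st h1 h2]
    apply ih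
    · exact pvPCfold_nodup pair.2 _ st.1 h1
    · by_cases hps : pair.2.isEmpty = true
      · simpa [hps] using h2
      · have hps' : pair.2.isEmpty = false := by simpa using hps
        simpa [hps'] using pvNPfold_nodup pair.2 _ st.2 h2


-- ===== VERDICT (by name: the statement is the Claim_ definition above) =====
theorem build_captions_class_matrix_spec : Claim_equal_build_captions_class_matrix := by
  intro filtered_nps predictions _
  show build_captions_class_matrix filtered_nps predictions
    = build_captions_class_matrix_alt filtered_nps predictions
  unfold build_captions_class_matrix build_captions_class_matrix_alt
  rw [pvTop (filtered_nps.zip predictions) (PySem.Dict.empty, PySem.Dict.empty)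
    PySem.Dict.nodup_keys_empty PySem.Dict.nodup_keys_empty]
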